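-- pv_equiv track=rewrite | github.com/ankur30587/HackkerrankPythonSolutions | The Captain's Room.py | find_captains_room
-- ===== SOURCE A (Python) =====
-- def find_captains_room(group_size, room_list):
--     room_count = {}
--
--     for room in room_list:
--         if room in room_count:
--             room_count[room] += 1
--         else:
--             room_count[room] = 1
--
--     for room, count in room_count.items():
--         if count == 1:
--             return room
-- ===== SOURCE B (Python) =====
-- def find_captains_room(group_size, room_list):
--     seen = set()
--     dup = set()
--     for room in room_list:
--         if room in seen:
--             dup.add(room)
--         else:
--             seen.add(room)
--     for room in room_list:
--         if room in seen and room not in dup: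
--             return room
-- ===== Notes on version B (the rewrite author's own statement) =====
-- stated objective: idiomatic
-- what changed: Replaces the count dictionary and the items() scan by two sets (seen/dup) built in one pass and a second scan over the original list returning the first non-duplicated room; group_size stays unused as in A.
-- outside the precondition, e.g. on find_captains_room(2, [1, 1]): A returns None, B returns None
import Mathlib
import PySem

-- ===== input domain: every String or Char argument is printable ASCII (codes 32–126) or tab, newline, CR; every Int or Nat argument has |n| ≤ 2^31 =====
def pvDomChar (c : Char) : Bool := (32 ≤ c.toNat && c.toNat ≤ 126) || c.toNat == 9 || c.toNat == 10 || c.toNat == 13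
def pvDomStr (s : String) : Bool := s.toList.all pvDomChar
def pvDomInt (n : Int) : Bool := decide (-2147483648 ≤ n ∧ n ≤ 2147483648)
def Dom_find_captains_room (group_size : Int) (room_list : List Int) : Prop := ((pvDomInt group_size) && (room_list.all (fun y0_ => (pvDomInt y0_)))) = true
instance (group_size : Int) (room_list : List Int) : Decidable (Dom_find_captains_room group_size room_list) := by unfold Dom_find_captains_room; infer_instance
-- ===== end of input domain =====

-- B replaces the count dictionary + items() scan by two sets (seen/dup) and a second scan of the list; equal first-match result proved on Pre_.

-- ===== PORT A =====
-- count dict built exactly as A's first loop; second loop = first item with count == 1.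
-- Where Python A falls through returning None (no room occurs exactly once) the port returns 0; Pre_ excludes those inputs.
def find_captains_room (group_size : Int) (room_list : List Int) : Int :=
  let room_count : PySem.Dict Int Int :=
    room_list.foldl (fun d room =>
      if d.contains room then d.insert room (d.getD room 0 + 1) else d.insert room 1)
      PySem.Dict.empty
  match room_count.items.find? (fun p => p.2 == 1) with
  | some p => p.1
  | none => 0

-- ===== PORT B =====
-- one pass building (seen, dup) sets, then the first room in seen \ dup; fallthrough (excluded by Pre_) gives 0.
def find_captains_room_alt (group_size : Int) (room_list : List Int) : Int :=
  let sd : PySem.Set Int × PySem.Set Int :=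
    room_list.foldl (fun sd room =>
      if PySem.Set.contains sd.1 room then (sd.1, PySem.Set.add sd.2 room)
      else (PySem.Set.add sd.1 room, sd.2))
      (PySem.Set.empty, PySem.Set.empty)
  match room_list.find? (fun room => PySem.Set.contains sd.1 room && !PySem.Set.contains sd.2 room) with
  | some room => room
  | none => 0

-- ===== PRECONDITION & SPEC =====
-- Pre_ excludes inputs where no room occurs exactly once: there Python A (and B) fall through and return None, not an int.
def Pre_find_captains_room (group_size : Int) (room_list : List Int) : Prop :=
  (room_list.any (fun r => room_list.count r == 1)) = true
instance (group_size : Int) (room_list : List Int) : Decidable (Pre_find_captains_room group_size room_list) := by unfold Pre_find_captains_room; infer_instance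
def pvWitness_find_captains_room : Int × List Int := (2, [1, 2, 2, 3, 3])

def Spec_find_captains_room (group_size : Int) (room_list : List Int) (out : Int) : Prop := out = find_captains_room_alt group_size room_list
instance (group_size : Int) (room_list : List Int) (out : Int) : Decidable (Spec_find_captains_room group_size room_list out) := by unfold Spec_find_captains_room; infer_instance

-- ===== CLAIM (what is proved, stated in full; the proofs are below) =====
def Claim_equal_find_captains_room : Prop := ∀ (group_size : Int) (room_list : List Int), Dom_find_captains_room group_size room_list → Pre_find_captains_room group_size room_list → Spec_find_captains_room group_size room_list (find_captains_room group_size room_list)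

-- ===== LEMMAS AND PROOFS =====

-- A's dict-building step is exactly Counter's step.
theorem aStep_eq_modify (d : PySem.Dict Int Int) (x : Int) :
    (if d.contains x then d.insert x (d.getD x 0 + 1) else d.insert x 1) = d.modify x 0 (· + 1) := by
  unfold PySem.Dict.modify
  by_cases h : d.contains x = true
  · simp [h]
  · have h0 : d.get? x = none := (PySem.Dict.get?_eq_none_iff_contains d x).mpr (by simpa using h)
    simp [h, PySem.Dict.getD, h0]

-- find? over a set that already found something is stable under adding more elements.
theorem find?_foldl_add_some {α : Type} [BEq α] [LawfulBEq α] (p : α → Bool) (xs : List α) :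
    ∀ (s : PySem.Set α) (a : α), s.find? p = some a → (xs.foldl PySem.Set.add s).find? p = some a := by
  induction xs with
  | nil => intro s a h; simpa using h
  | cons x xs ih =>
    intro s a h
    simp only [List.foldl_cons]
    apply ih
    unfold PySem.Set.add
    split_ifs
    · exact h
    · simp [List.find?_append, h]

-- find? over the set built from xs (no earlier hit in s) = find? over xs itself.
theorem find?_foldl_add_none {α : Type} [BEq α] [LawfulBEq α] (p : α → Bool) (xs : List α) :
    ∀ (s : PySem.Set α), s.find? p = none → (xs.foldl PySem.Set.add s).find? p = xs.find? p := by
  induction xs with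
  | nil => intro s h; simpa using h
  | cons x xs ih =>
    intro s h
    simp only [List.foldl_cons, List.find?_cons]
    by_cases hc : PySem.Set.contains s x = true
    · have hx : x ∈ s := (PySem.Set.contains_iff s x).mp hc
      have hpx : p x = false := by
        cases hpx : p x
        · rfl
        · exact absurd hpx (by simpa using List.find?_eq_none.mp h x hx)
      rw [show PySem.Set.add s x = s from by simp [PySem.Set.add, hx]]
      simp only [hpx, cond_false]
      exact ih s h
    · have hx : x ∉ s := fun hm => hc ((PySem.Set.contains_iff s x).mpr hm)
      have hadd : PySem.Set.add s x = s ++ [x] := by simp [PySem.Set.add, hx]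
      cases hpx : p x
      · simp only [cond_false]
        rw [hadd] at *
        apply ih
        simp [List.find?_append, h, hpx]
      · simp only [cond_true]
        apply find?_foldl_add_some
        rw [hadd]
        simp [List.find?_append, h, hpx]

theorem find?_congr_mem' {α : Type} (p q : α → Bool) (xs : List α)
    (h : ∀ x ∈ xs, p x = q x) : xs.find? p = xs.find? q := by
  induction xs with
  | nil => rfl
  | cons x xs ih =>
    simp only [List.find?_cons, h x (List.mem_cons_self)]
    cases hq : q x
    · simp only [hq, cond_false]
      exact ih (fun y hy => h y (List.mem_cons_of_mem _ hy))
    · simp [hq]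

-- B's fold: first component is the running `seen` set.
theorem bfold_fst (xs : List Int) :
    ∀ (s d : PySem.Set Int),
      (xs.foldl (fun sd room =>
        if PySem.Set.contains sd.1 room then (sd.1, PySem.Set.add sd.2 room)
        else (PySem.Set.add sd.1 room, sd.2)) (s, d)).1 = xs.foldl PySem.Set.add s := by
  induction xs with
  | nil => intro s d; rfl
  | cons x xs ih =>
    intro s d
    simp only [List.foldl_cons]
    by_cases hc : PySem.Set.contains s x = true
    · have hx : x ∈ s := (PySem.Set.contains_iff s x).mp hc
      rw [show PySem.Set.add s x = s from by simp [PySem.Set.add, hx]]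
      simpa [hx] using ih s (PySem.Set.add d x)
    · have hx : x ∉ s := fun hm => hc ((PySem.Set.contains_iff s x).mpr hm)
      simpa [hx] using ih (PySem.Set.add s x) d

-- B's fold: membership in the `dup` component.
theorem bfold_snd (xs : List Int) :
    ∀ (s d : PySem.Set Int) (r : Int),
      r ∈ (xs.foldl (fun sd room =>
        if PySem.Set.contains sd.1 room then (sd.1, PySem.Set.add sd.2 room)
        else (PySem.Set.add sd.1 room, sd.2)) (s, d)).2 ↔
      r ∈ d ∨ (r ∈ s ∧ r ∈ xs) ∨ 2 ≤ xs.count r := by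
  induction xs with
  | nil => intro s d r; simp
  | cons x xs ih =>
    intro s d r
    simp only [List.foldl_cons]
    by_cases hc : PySem.Set.contains s x = true
    · have hx : x ∈ s := (PySem.Set.contains_iff s x).mp hc
      rw [if_pos hc, ih s (PySem.Set.add d x) r]
      by_cases hr : r = x
      · subst hr
        simp [PySem.Set.mem_add, hx, List.mem_cons]
      · have hxr : ¬ x = r := fun h => hr h.symm
        simp [PySem.Set.mem_add, hr, hxr, List.count_cons, List.mem_cons]
    · have hx : x ∉ s := fun hm => hc ((PySem.Set.contains_iff s x).mpr hm)
      rw [if_neg hc, ih (PySem.Set.add s x) d r]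
      by_cases hr : r = x
      · subst hr
        rw [List.count_cons_self]
        have hmem : r ∈ PySem.Set.add s r := (PySem.Set.mem_add s r r).mpr (Or.inr rfl)
        have hcnt : 0 < xs.count r ↔ r ∈ xs := List.count_pos_iff
        constructor
        · rintro (h | ⟨_, hxs⟩ | h)
          · exact Or.inl h
          · exact Or.inr (Or.inr (by have := hcnt.mpr hxs; omega))
          · exact Or.inr (Or.inr (by omega))
        · rintro (h | ⟨hs', _⟩ | h)
          · exact Or.inl h
          · exact absurd hs' hx
          · by_cases h2 : 2 ≤ xs.count r
            · exact Or.inr (Or.inr h2)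
            · exact Or.inr (Or.inl ⟨hmem, hcnt.mp (by omega)⟩)
      · have hxr : ¬ x = r := fun h => hr h.symm
        simp [PySem.Set.mem_add, hr, hxr, List.count_cons, List.mem_cons]

-- ===== VERDICT (by name: the statement is the Claim_ definition above) =====
theorem find_captains_room_spec : Claim_equal_find_captains_room := by
  intro group_size room_list _ _
  unfold Spec_find_captains_room
  simp only [find_captains_room, find_captains_room_alt]
  have hstep : (fun (d : PySem.Dict Int Int) (room : Int) =>
      if d.contains room then d.insert room (d.getD room 0 + 1) else d.insert room 1) =
      (fun (d : PySem.Dict Int Int) (x : Int) => d.modify x 0 (· + 1)) := by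
    funext d x
    exact aStep_eq_modify d x
  rw [hstep, ← PySem.Dict.counter_eq_foldl, PySem.Dict.items_counter, List.find?_map]
  rw [bfold_fst]
  rw [show List.foldl PySem.Set.add PySem.Set.empty room_list = PySem.Set.ofList room_list from rfl]
  have hofind : (PySem.Set.ofList room_list).find?
      ((fun (p : Int × Int) => p.2 == 1) ∘ fun k => (k, (room_list.count k : Int))) =
      room_list.find? ((fun (p : Int × Int) => p.2 == 1) ∘ fun k => (k, (room_list.count k : Int))) := by
    rw [PySem.Set.ofList_eq_foldl]
    exact find?_foldl_add_none _ _ _ rfl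
  rw [hofind]
  have hpred : room_list.find? ((fun (p : Int × Int) => p.2 == 1) ∘ fun k => (k, (room_list.count k : Int))) =
      room_list.find? (fun room => (PySem.Set.ofList room_list).contains room &&
        !(PySem.Set.contains (room_list.foldl (fun sd room =>
            if PySem.Set.contains sd.1 room then (sd.1, PySem.Set.add sd.2 room)
            else (PySem.Set.add sd.1 room, sd.2)) (PySem.Set.empty, PySem.Set.empty)).2 room)) := by
    apply find?_congr_mem'
    intro r hr
    have hseen : (PySem.Set.ofList room_list).contains r = true :=
      (PySem.Set.contains_iff _ r).mpr ((PySem.Set.mem_ofList room_list r).mpr hr)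
    have hdup : (PySem.Set.contains (room_list.foldl (fun sd room =>
        if PySem.Set.contains sd.1 room then (sd.1, PySem.Set.add sd.2 room)
        else (PySem.Set.add sd.1 room, sd.2)) (PySem.Set.empty, PySem.Set.empty)).2 r) =
        decide (2 ≤ room_list.count r) := by
      by_cases h2 : 2 ≤ room_list.count r
      · simp only [h2, decide_true]
        exact (PySem.Set.contains_iff _ r).mpr
          ((bfold_snd room_list PySem.Set.empty PySem.Set.empty r).mpr (Or.inr (Or.inr h2)))
      · simp only [h2, decide_false]
        rw [← Bool.not_eq_true]
        intro hcontr
        have := (bfold_snd room_list PySem.Set.empty PySem.Set.empty r).mp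
          ((PySem.Set.contains_iff _ r).mp hcontr)
        simp [PySem.Set.empty] at this
        exact h2 this
    rw [hseen, hdup]
    have hpos : 1 ≤ room_list.count r := List.count_pos_iff.mpr hr
    simp only [Function.comp, Bool.true_and]
    by_cases h2 : 2 ≤ room_list.count r
    · have : ((room_list.count r : Int) ≠ 1) := by
        intro h
        have : room_list.count r = 1 := by exact_mod_cast h
        omega
      simp [h2, this]
    · have hone : room_list.count r = 1 := by omega
      simp [h2, hone]
  rw [hpred]
  cases room_list.find? (fun room => (PySem.Set.ofList room_list).contains room &&
        !(PySem.Set.contains (room_list.foldl (fun sd room =>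
            if PySem.Set.contains sd.1 room then (sd.1, PySem.Set.add sd.2 room)
            else (PySem.Set.add sd.1 room, sd.2)) (PySem.Set.empty, PySem.Set.empty)).2 room)) <;>
    simp
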